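-- pv_equiv track=rewrite | github.com/23himanshusingh/PYTHON | star diamond.py | reverse_triangle1
-- ===== SOURCE A (Python) =====
-- def reverse_triangle1(n):
--     ans=[]
--     for i in range(n):
--         lis=[]
--         for j in range(i,n):
--             lis.append('*')
--         for j in range(i+1):
--             lis.append(' ')
--         ans.append(lis)
--     return ans
-- ===== SOURCE B (Python) =====
-- def reverse_triangle1(n):
--     ans = []
--     if n > 0:
--         cur = ['*'] * n + [' ']
--         ans.append(cur.copy())
--         for i in range(1, n):
--             cur[n - i] = ' '
--             ans.append(cur.copy())
--     return ans
-- ===== Notes on version B (the rewrite author's own statement) =====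
-- stated objective: alternative
-- what changed: B keeps one evolving row and flips a single cell per step (cur[n-i]=' '), appending a copy, instead of rebuilding every row element by element with two inner append loops; it trades the two inner loops for one mutation plus a copy per row.
import Mathlib
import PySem

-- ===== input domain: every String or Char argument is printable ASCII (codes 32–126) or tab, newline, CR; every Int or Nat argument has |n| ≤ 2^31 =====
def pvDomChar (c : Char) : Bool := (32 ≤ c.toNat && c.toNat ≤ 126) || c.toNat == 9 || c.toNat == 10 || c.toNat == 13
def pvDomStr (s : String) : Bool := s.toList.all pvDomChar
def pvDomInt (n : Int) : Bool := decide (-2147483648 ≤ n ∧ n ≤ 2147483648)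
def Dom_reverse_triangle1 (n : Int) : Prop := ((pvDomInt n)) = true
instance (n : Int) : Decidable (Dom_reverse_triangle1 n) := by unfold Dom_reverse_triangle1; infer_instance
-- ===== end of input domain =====

-- B keeps one evolving row, flipping a single cell per step, instead of rebuilding
-- every row with two inner append loops (objective: alternative decomposition).

-- ===== PORT A =====
def reverse_triangle1 (n : Int) : List (List String) :=
  (PySem.List.pyRange 0 n 1).foldl (fun ans i =>
    let lis : List String := []
    let lis := (PySem.List.pyRange i n 1).foldl (fun l _ => l ++ ["*"]) lis
    let lis := (PySem.List.pyRange 0 (i+1) 1).foldl (fun l _ => l ++ [" "]) lis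
    ans ++ [lis]) []

-- ===== PORT B =====
def reverse_triangle1_alt (n : Int) : List (List String) :=
  if 0 < n then
    let cur : List String := List.replicate n.toNat "*" ++ [" "]
    let st := (PySem.List.pyRange 1 n 1).foldl
      (fun (st : List String × List (List String)) i =>
        let cur := PySem.List.pySetD st.1 (n - i) " "
        (cur, st.2 ++ [cur]))
      (cur, [cur])
    st.2
  else []

-- ===== PRECONDITION & SPEC =====
def Spec_reverse_triangle1 (n : Int) (out : List (List String)) : Prop := out = reverse_triangle1_alt n
instance (n : Int) (out : List (List String)) : Decidable (Spec_reverse_triangle1 n out) := by unfold Spec_reverse_triangle1; infer_instance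

-- ===== CLAIM (what is proved, stated in full; the proofs are below) =====
def Claim_equal_reverse_triangle1 : Prop := ∀ (n : Int), Dom_reverse_triangle1 n → Spec_reverse_triangle1 n (reverse_triangle1 n)

-- ===== LEMMAS AND PROOFS =====

-- row m i : the i-th output row, (m-i) stars then (i+1) spaces
def pvRow (m i : Nat) : List String :=
  List.replicate (m - i) "*" ++ List.replicate (i + 1) " "

theorem pv_foldl_snoc_const (L : List Int) (acc : List String) (c : String) :
    L.foldl (fun l _ => l ++ [c]) acc = acc ++ List.replicate L.length c := by
  induction L generalizing acc with
  | nil => simp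
  | cons x xs ih => simp [ih, List.replicate_succ]

theorem pv_foldl_snoc_map (L : List Int) (f : Int → List String) (acc : List (List String)) :
    L.foldl (fun ans i => ans ++ [f i]) acc = acc ++ L.map f := by
  induction L generalizing acc with
  | nil => simp
  | cons x xs ih => simp [ih]

theorem pvA_closed (n : Int) (hn : 0 < n) :
    reverse_triangle1 n = (List.range n.toNat).map (pvRow n.toNat) := by
  unfold reverse_triangle1
  rw [pv_foldl_snoc_map]
  rw [PySem.List.pyRange_one 0 n]
  simp only [List.map_map, List.nil_append]
  rw [show (n - 0).toNat = n.toNat by omega]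
  refine List.map_congr_left (fun k hk => ?_)
  rw [List.mem_range] at hk
  simp only [Function.comp]
  rw [pv_foldl_snoc_const, pv_foldl_snoc_const]
  simp only [PySem.List.length_pyRange_one, List.nil_append, pvRow]
  congr 2 <;> omega

theorem pv_set_row (a b : Nat) :
    (List.replicate (a+1) "*" ++ List.replicate b " ").set a " "
      = List.replicate a "*" ++ List.replicate (b+1) " " := by
  induction a with
  | zero => simp [List.replicate_succ]
  | succ a ih =>
    show "*" :: (List.replicate (a+1) "*" ++ List.replicate b " ").set a " "
       = "*" :: (List.replicate a "*" ++ List.replicate (b+1) " ")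
    exact congrArg _ ih

theorem pvB_inv (n : Int) (hn : 0 < n) (t : Nat) (ht : (t : Int) + 1 ≤ n) :
    (PySem.List.pyRange 1 ((t : Int) + 1) 1).foldl
      (fun (st : List String × List (List String)) i =>
        let cur := PySem.List.pySetD st.1 (n - i) " "
        (cur, st.2 ++ [cur]))
      (pvRow n.toNat 0, [pvRow n.toNat 0])
    = (pvRow n.toNat t, (List.range (t + 1)).map (pvRow n.toNat)) := by
  induction t with
  | zero =>
    rw [PySem.List.pyRange_one_eq_nil (by norm_num)]
    simp [List.range_succ]
  | succ t ih =>
    have h1 : (1 : Int) ≤ (t : Int) + 1 := by omega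
    have ht' : (t : Int) + 1 ≤ n := by push_cast at ht ⊢; omega
    rw [show ((t + 1 : Nat) : Int) + 1 = ((t : Int) + 1) + 1 by push_cast; ring]
    rw [PySem.List.pyRange_one_succ_right h1, List.foldl_append, ih ht']
    have hlt : (t : Int) + 1 < n := by push_cast at ht; omega
    have hnn : (0 : Int) ≤ n - ((t : Int) + 1) := by omega
    simp only [List.foldl_cons, List.foldl_nil]
    rw [PySem.List.pySetD_of_nonneg _ _ hnn]
    have hidx : (n - ((t : Int) + 1)).toNat = n.toNat - (t + 1) := by omega
    rw [hidx]
    have hrow : pvRow n.toNat t =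
        List.replicate (n.toNat - (t+1) + 1) "*" ++ List.replicate (t+1) " " := by
      unfold pvRow; congr 1; congr 1; omega
    rw [hrow, pv_set_row]
    rw [show List.replicate (n.toNat - (t + 1)) "*" ++ List.replicate (t + 1 + 1) " "
          = pvRow n.toNat (t + 1) from rfl]
    rw [List.range_succ (n := t + 1), List.map_append, List.map_cons, List.map_nil]

-- ===== VERDICT (by name: the statement is the Claim_ definition above) =====
theorem reverse_triangle1_spec : Claim_equal_reverse_triangle1 := by
  intro n _
  unfold Spec_reverse_triangle1 reverse_triangle1_alt
  by_cases hn : 0 < n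
  · rw [if_pos hn, pvA_closed n hn]
    have hcur : List.replicate n.toNat "*" ++ [" "] = pvRow n.toNat 0 := by
      simp [pvRow]
    simp only [hcur]
    have hm : 1 ≤ n.toNat := by omega
    have hcast : ((n.toNat - 1 : Nat) : Int) + 1 = n := by omega
    have := pvB_inv n hn (n.toNat - 1) (by omega)
    rw [hcast, show n.toNat - 1 + 1 = n.toNat by omega] at this
    simp only [this]
  · rw [if_neg hn]
    unfold reverse_triangle1
    rw [PySem.List.pyRange_one_eq_nil (by omega)]
    rfl
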